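-- pv_equiv track=rewrite | github.com/Minxhvk/Algorithm | BOJ/문제집/2696.py | solution
-- ===== SOURCE A (Python) =====
-- import heapq
--
-- def solution(test_set):
--
--     min_heap = []
--     max_heap = []
--
--     temp_answer = []
--
--     for idx, val in enumerate(test_set, 1):
--         if len(min_heap) == len(max_heap):
--             heapq.heappush(max_heap, -val)
--         else:
--             heapq.heappush(min_heap, val)
--
--         if min_heap and min_heap[0] < -max_heap[0]:
--             min_val = heapq.heappop(min_heap)
--             max_val = heapq.heappop(max_heap)
--
--             heapq.heappush(max_heap, -min_val)
--             heapq.heappush(min_heap, -max_val)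
--
--         if idx % 2 == 1:
--             temp_answer.append(-max_heap[0])
--
--     return temp_answer
-- ===== SOURCE B (Python) =====
-- import bisect
--
-- def solution(test_set):
--     ordered = []
--     answer = []
--     for idx, val in enumerate(test_set, 1):
--         bisect.insort(ordered, val)
--         if idx % 2 == 1:
--             answer.append(ordered[(idx - 1) // 2])
--     return answer
-- ===== Notes on version B (the rewrite author's own statement) =====
-- stated objective: simpler
-- what changed: Replaces the two heaps and the rebalance step by a single sorted list maintained with bisect.insort; at each odd index the lower median is read directly at position (idx-1)//2.
import Mathlib
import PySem

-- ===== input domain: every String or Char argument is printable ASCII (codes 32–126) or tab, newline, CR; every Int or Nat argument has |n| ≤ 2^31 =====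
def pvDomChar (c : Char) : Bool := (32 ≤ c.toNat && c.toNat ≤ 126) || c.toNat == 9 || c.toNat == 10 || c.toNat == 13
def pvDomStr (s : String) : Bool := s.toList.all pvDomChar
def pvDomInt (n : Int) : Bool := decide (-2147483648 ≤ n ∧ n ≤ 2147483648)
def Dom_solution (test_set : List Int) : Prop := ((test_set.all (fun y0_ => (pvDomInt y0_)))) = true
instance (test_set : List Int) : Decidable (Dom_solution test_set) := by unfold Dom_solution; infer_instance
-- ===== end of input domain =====

-- B replaces A's two heaps + rebalance by one list kept sorted by ordered insertion,
-- reading the lower median directly at index (idx-1)//2; objective: simpler.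

-- ===== PORT A =====
-- heapq ported step for step from CPython's pure-Python heapq (heappush, heappop, _siftdown, _siftup).
def pvGet (h : List Int) (i : Nat) : Int := h.getD i 0

-- CPython _siftdown(heap, startpos, pos) with newitem = heap[pos] passed explicitly.
def siftdown (heap : List Int) (startpos pos : Nat) (newitem : Int) : List Int :=
  if _h : startpos < pos then
    let parentpos := (pos - 1) / 2
    let parent := pvGet heap parentpos
    if newitem < parent then
      siftdown (heap.set pos parent) startpos parentpos newitem
    else heap.set pos newitem
  else heap.set pos newitem
termination_by pos
decreasing_by omega

-- CPython _siftup(heap, pos): move the hole down to a leaf, then _siftdown back up.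
def siftup (heap : List Int) (startpos pos : Nat) (newitem : Int) : List Int :=
  let endpos := heap.length
  if hc : 2 * pos + 1 < endpos then
    let childpos :=
      if 2 * pos + 2 < endpos ∧ ¬ (pvGet heap (2 * pos + 1) < pvGet heap (2 * pos + 2)) then
        2 * pos + 2
      else 2 * pos + 1
    siftup (heap.set pos (pvGet heap childpos)) startpos childpos newitem
  else siftdown (heap.set pos newitem) startpos pos newitem
termination_by heap.length - pos
decreasing_by simp [List.length_set]; split <;> omega

def heappush (heap : List Int) (item : Int) : List Int :=
  siftdown (heap ++ [item]) 0 heap.length item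

def heappop (heap : List Int) : Int × List Int :=
  let lastelt := pvGet heap (heap.length - 1)
  let rest := heap.dropLast
  if rest ≠ [] then
    (pvGet rest 0, siftup (rest.set 0 lastelt) 0 0 lastelt)
  else (lastelt, rest)

def aStep (minh maxh : List Int) (v : Int) : List Int × List Int :=
  let st :=
    if minh.length == maxh.length then (minh, heappush maxh (-v))
    else (heappush minh v, maxh)
  if st.1 ≠ [] ∧ pvGet st.1 0 < -(pvGet st.2 0) then
    let p1 := heappop st.1
    let p2 := heappop st.2
    (heappush p1.2 (-p2.1), heappush p2.2 (-p1.1))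
  else st

def aLoop (vals : List Int) (minh maxh : List Int) (idx : Nat) (ans : List Int) : List Int :=
  match vals with
  | [] => ans
  | v :: rest =>
    let st := aStep minh maxh v
    let ans2 := if idx % 2 == 1 then ans ++ [-(pvGet st.2 0)] else ans
    aLoop rest st.1 st.2 (idx + 1) ans2

def solution (test_set : List Int) : List Int := aLoop test_set [] [] 1 []

-- ===== PORT B =====
-- bisect.insort (insert after equal elements, i.e. before the first strictly greater).
def insortR : List Int → Int → List Int
  | [], x => [x]
  | y :: t, x => if x < y then x :: y :: t else y :: insortR t x

def bLoop (vals : List Int) (ordered : List Int) (idx : Nat) (ans : List Int) : List Int :=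
  match vals with
  | [] => ans
  | v :: rest =>
    let ordered2 := insortR ordered v
    let ans2 := if idx % 2 == 1 then ans ++ [pvGet ordered2 ((idx - 1) / 2)] else ans
    bLoop rest ordered2 (idx + 1) ans2

def solution_alt (test_set : List Int) : List Int := bLoop test_set [] 1 []

-- ===== PRECONDITION & SPEC =====
def Spec_solution (test_set : List Int) (out : List Int) : Prop := out = solution_alt test_set
instance (test_set : List Int) (out : List Int) : Decidable (Spec_solution test_set out) := by unfold Spec_solution; infer_instance

-- ===== CLAIM (what is proved, stated in full; the proofs are below) =====
def Claim_equal_solution : Prop := ∀ (test_set : List Int), Dom_solution test_set → Spec_solution test_set (solution test_set)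

-- ===== LEMMAS AND PROOFS =====

def IsHeap (h : List Int) : Prop :=
  ∀ i j : Nat, (j = 2 * i + 1 ∨ j = 2 * i + 2) → j < h.length → pvGet h i ≤ pvGet h j

-- pvGet basics
lemma pvGet_set_self (l : List Int) (i : Nat) (a : Int) (h : i < l.length) :
    pvGet (l.set i a) i = a := by
  simp [pvGet, List.getD, h]

lemma pvGet_set_ne (l : List Int) (i j : Nat) (a : Int) (h : i ≠ j) :
    pvGet (l.set i a) j = pvGet l j := by
  simp [pvGet, List.getD, List.getElem?_set_ne h]

lemma pvGet_append_lt (l l' : List Int) (i : Nat) (h : i < l.length) :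
    pvGet (l ++ l') i = pvGet l i := by
  simp [pvGet, List.getD, List.getElem?_append_left h]


lemma pvGet_mem (l : List Int) (i : Nat) (h : i < l.length) : pvGet l i ∈ l := by
  simp [pvGet, List.getD, List.getElem?_eq_getElem h]

-- core transposition lemma
lemma set_cons_perm (t : List Int) (k : Nat) (a : Int) (h : k < t.length) :
    List.Perm (pvGet t k :: t.set k a) (a :: t) := by
  induction t generalizing k with
  | nil => simp at h
  | cons y u ih =>
    cases k with
    | zero => simpa [pvGet] using List.Perm.swap a y u
    | succ k =>
      have hk : k < u.length := by simpa using h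
      have h1 : List.Perm (pvGet u k :: y :: u.set k a) (y :: pvGet u k :: u.set k a) :=
        List.Perm.swap y (pvGet u k) _
      have h2 : List.Perm (y :: pvGet u k :: u.set k a) (y :: a :: u) :=
        List.Perm.cons y (ih k hk)
      have h3 : List.Perm (y :: a :: u) (a :: y :: u) := List.Perm.swap a y u
      have : pvGet (y :: u) (k+1) = pvGet u k := by simp [pvGet]
      rw [this]
      exact ((h1.trans h2).trans h3)

lemma perm_set_swap (l : List Int) (i j : Nat) (a : Int)
    (hi : i < l.length) (hj : j < l.length) (hij : i ≠ j) :
    List.Perm ((l.set i (pvGet l j)).set j a) (l.set i a) := by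
  have hj' : j < (l.set i (pvGet l j)).length := by simpa using hj
  have h1 := set_cons_perm (l.set i (pvGet l j)) j a hj'
  rw [pvGet_set_ne l i j (pvGet l j) hij] at h1
  -- h1 : pvGet l j :: (l.set i (pvGet l j)).set j a ~ a :: l.set i (pvGet l j)
  have h2 := set_cons_perm l i (pvGet l j) hi
  -- h2 : pvGet l i :: l.set i (pvGet l j) ~ pvGet l j :: l
  have h3 := set_cons_perm l i a hi
  -- h3 : pvGet l i :: l.set i a ~ a :: l
  -- show a :: l.set i (pvGet l j) ~ pvGet l j :: l.set i a
  have h4 : List.Perm (pvGet l i :: a :: l.set i (pvGet l j)) (pvGet l i :: pvGet l j :: l.set i a) :=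
    ((((List.Perm.swap a (pvGet l i) _).trans (List.Perm.cons a h2)).trans
      (List.Perm.swap _ _ _)).trans (List.Perm.cons _ h3.symm)).trans (List.Perm.swap _ _ _)
  have h5 : List.Perm (a :: l.set i (pvGet l j)) (pvGet l j :: l.set i a) := h4.cons_inv
  exact (h1.trans h5).cons_inv

-- heap root is minimal
lemma heap_root_le (h : List Int) (hh : IsHeap h) : ∀ i : Nat, i < h.length → pvGet h 0 ≤ pvGet h i := by
  intro i
  induction i using Nat.strong_induction_on with
  | _ i ih =>
    intro hi
    cases Nat.eq_zero_or_pos i with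
    | inl h0 => subst h0; exact le_refl _
    | inr hpos =>
      have hedge : i = 2 * ((i - 1) / 2) + 1 ∨ i = 2 * ((i - 1) / 2) + 2 := by omega
      have hp := hh ((i - 1) / 2) i hedge hi
      exact le_trans (ih ((i - 1) / 2) (by omega) (by omega)) hp

lemma heap_root_min (h : List Int) (hh : IsHeap h) (b : Int) (hb : b ∈ h) : pvGet h 0 ≤ b := by
  obtain ⟨i, hi, rfl⟩ := List.mem_iff_getElem.mp hb
  have : pvGet h i = h[i] := by simp [pvGet, List.getD, List.getElem?_eq_getElem hi]
  rw [← this]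
  exact heap_root_le h hh i hi

-- unfolding lemmas for siftdown
lemma siftdown_step (h : List Int) (pos : Nat) (x : Int) (h0 : 0 < pos)
    (hlt : x < pvGet h ((pos - 1) / 2)) :
    siftdown h 0 pos x = siftdown (h.set pos (pvGet h ((pos - 1) / 2))) 0 ((pos - 1) / 2) x := by
  conv_lhs => rw [siftdown]
  simp [h0, hlt]

lemma siftdown_stop (h : List Int) (pos : Nat) (x : Int)
    (hstop : ¬(0 < pos ∧ x < pvGet h ((pos - 1) / 2))) :
    siftdown h 0 pos x = h.set pos x := by
  conv_lhs => rw [siftdown]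
  by_cases h0 : 0 < pos
  · have hnlt : ¬ x < pvGet h ((pos - 1) / 2) := fun hl => hstop ⟨h0, hl⟩
    simp [h0, hnlt]
  · simp [h0]

-- siftdown correctness
lemma siftdown_ok : ∀ (pos : Nat) (h : List Int) (x : Int),
    pos < h.length →
    (∀ i j : Nat, (j = 2 * i + 1 ∨ j = 2 * i + 2) → j < h.length → i ≠ pos → j ≠ pos →
      pvGet h i ≤ pvGet h j) →
    (∀ j : Nat, (j = 2 * pos + 1 ∨ j = 2 * pos + 2) → j < h.length → x ≤ pvGet h j) →
    (0 < pos → ∀ j : Nat, (j = 2 * pos + 1 ∨ j = 2 * pos + 2) → j < h.length →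
      pvGet h ((pos - 1) / 2) ≤ pvGet h j) →
    IsHeap (siftdown h 0 pos x) ∧ List.Perm (siftdown h 0 pos x) (h.set pos x) := by
  intro pos
  induction pos using Nat.strong_induction_on with
  | _ pos ih =>
    intro h x hpos ha hb hc
    by_cases hrec : 0 < pos ∧ x < pvGet h ((pos - 1) / 2)
    · obtain ⟨h0, hlt⟩ := hrec
      have hpplt : (pos - 1) / 2 < pos := by omega
      have hpplen : (pos - 1) / 2 < h.length := lt_trans hpplt hpos
      rw [siftdown_step h pos x h0 hlt]
      have hlen' : (h.set pos (pvGet h ((pos - 1) / 2))).length = h.length := by simp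
      obtain ⟨hH, hP⟩ := ih ((pos - 1) / 2) hpplt (h.set pos (pvGet h ((pos - 1) / 2))) x
        (by omega)
        (by -- A'
          intro i j hedge hj hip hjp
          have hjlen : j < h.length := by omega
          by_cases hipos : i = pos
          · rw [hipos] at hedge ⊢
            rw [pvGet_set_self h pos _ hpos]
            rw [pvGet_set_ne h pos j _ (by omega)]
            exact hc h0 j hedge hjlen
          · by_cases hjpos : j = pos
            · exfalso; apply hip; omega
            · rw [pvGet_set_ne h pos i _ (fun e => hipos e.symm)]
              rw [pvGet_set_ne h pos j _ (fun e => hjpos e.symm)]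
              exact ha i j hedge hjlen hipos hjpos)
        (by -- B'
          intro j hedge hj
          have hjlen : j < h.length := by omega
          by_cases hjpos : j = pos
          · rw [hjpos]
            rw [pvGet_set_self h pos _ hpos]
            exact le_of_lt hlt
          · rw [pvGet_set_ne h pos j _ (fun e => hjpos e.symm)]
            exact le_trans (le_of_lt hlt)
              (ha ((pos - 1) / 2) j hedge hjlen (by omega) hjpos))
        (by -- C'
          intro hpp0 j hedge hj
          have hjlen : j < h.length := by omega
          have hgpedge : (pos - 1) / 2 = 2 * (((pos - 1) / 2 - 1) / 2) + 1 ∨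
              (pos - 1) / 2 = 2 * (((pos - 1) / 2 - 1) / 2) + 2 := by omega
          rw [pvGet_set_ne h pos (((pos - 1) / 2 - 1) / 2) _ (by omega)]
          by_cases hjpos : j = pos
          · rw [hjpos]
            rw [pvGet_set_self h pos _ hpos]
            exact ha _ _ hgpedge hpplen (by omega) (by omega)
          · rw [pvGet_set_ne h pos j _ (fun e => hjpos e.symm)]
            exact le_trans (ha _ _ hgpedge hpplen (by omega) (by omega))
              (ha ((pos - 1) / 2) j hedge hjlen (by omega) hjpos))
      refine ⟨hH, hP.trans ?_⟩
      exact perm_set_swap h pos ((pos - 1) / 2) x hpos hpplen (by omega)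
    · rw [siftdown_stop h pos x hrec]
      refine ⟨?_, List.Perm.refl _⟩
      intro i j hedge hj
      have hjlen : j < h.length := by simpa using hj
      have hjne0 : j ≠ 0 := by omega
      by_cases hipos : i = pos
      · subst hipos
        rw [pvGet_set_self h i x hpos, pvGet_set_ne h i j _ (by omega)]
        exact hb j hedge hjlen
      · by_cases hjpos : j = pos
        · subst hjpos
          have h0 : 0 < j := by omega
          have hipp : i = (j - 1) / 2 := by omega
          have hnlt : ¬ x < pvGet h ((j - 1) / 2) := fun hl => hrec ⟨h0, hl⟩
          rw [pvGet_set_self h j x hpos, pvGet_set_ne h j i _ (fun e => hipos e.symm)]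
          rw [hipp]
          exact le_of_not_gt hnlt
        · rw [pvGet_set_ne h pos i _ (fun e => hipos e.symm)]
          rw [pvGet_set_ne h pos j _ (fun e => hjpos e.symm)]
          exact ha i j hedge hjlen hipos hjpos

-- unfolding lemmas for siftup
lemma siftup_step (h : List Int) (pos : Nat) (x : Int) (c : Nat) (hc : 2 * pos + 1 < h.length)
    (hcdef : c = if 2 * pos + 2 < h.length ∧ ¬(pvGet h (2 * pos + 1) < pvGet h (2 * pos + 2))
      then 2 * pos + 2 else 2 * pos + 1) :
    siftup h 0 pos x = siftup (h.set pos (pvGet h c)) 0 c x := by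
  subst hcdef
  conv_lhs => rw [siftup]
  simp [hc]

lemma siftup_stop (h : List Int) (pos : Nat) (x : Int) (hc : ¬ 2 * pos + 1 < h.length) :
    siftup h 0 pos x = siftdown (h.set pos x) 0 pos x := by
  conv_lhs => rw [siftup]
  simp [hc]

-- siftup correctness
lemma siftup_ok : ∀ (k : Nat) (h : List Int) (pos : Nat) (x : Int),
    h.length - pos = k → pos < h.length →
    (∀ i j : Nat, (j = 2 * i + 1 ∨ j = 2 * i + 2) → j < h.length → i ≠ pos → j ≠ pos →
      pvGet h i ≤ pvGet h j) →
    (0 < pos → ∀ j : Nat, (j = 2 * pos + 1 ∨ j = 2 * pos + 2) → j < h.length →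
      pvGet h ((pos - 1) / 2) ≤ pvGet h j) →
    IsHeap (siftup h 0 pos x) ∧ List.Perm (siftup h 0 pos x) (h.set pos x) := by
  intro k
  induction k using Nat.strong_induction_on with
  | _ k ih =>
    intro h pos x hk hpos ha hc
    by_cases hch : 2 * pos + 1 < h.length
    · set c : Nat := if 2 * pos + 2 < h.length ∧ ¬(pvGet h (2 * pos + 1) < pvGet h (2 * pos + 2))
        then 2 * pos + 2 else 2 * pos + 1 with hcdef
      have hcedge : c = 2 * pos + 1 ∨ c = 2 * pos + 2 := by
        rw [hcdef]; split <;> omega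
      have hclen : c < h.length := by
        rw [hcdef]; split <;> omega
      have hcpos : pos < c := by omega
      have hsmall : ∀ j : Nat, (j = 2 * pos + 1 ∨ j = 2 * pos + 2) → j < h.length →
          pvGet h c ≤ pvGet h j := by
        intro j hj hjlen
        rw [hcdef]
        split
        · rename_i hcond
          rcases hj with rfl | rfl
          · exact le_of_not_gt hcond.2
          · exact le_refl _
        · rename_i hcond
          rcases hj with rfl | rfl
          · exact le_refl _
          · rcases not_and_or.mp hcond with hlen2 | hlt2
            · omega
            · exact le_of_lt (not_not.mp hlt2)
      rw [siftup_step h pos x c hch hcdef]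
      have hlen' : (h.set pos (pvGet h c)).length = h.length := by simp
      obtain ⟨hH, hP⟩ := ih (h.length - c) (by omega) (h.set pos (pvGet h c)) c x
        (by omega) (by omega)
        (by -- A'
          intro i j hedge hj hic hjc
          have hjlen : j < h.length := by omega
          by_cases hipos : i = pos
          · rw [hipos] at hedge ⊢
            rw [pvGet_set_self h pos _ hpos]
            rw [pvGet_set_ne h pos j _ (by omega)]
            exact hsmall j hedge hjlen
          · by_cases hjpos : j = pos
            · -- then i is the parent of pos
              have h0 : 0 < pos := by omega
              have hipp : i = (pos - 1) / 2 := by omega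
              rw [hjpos, pvGet_set_self h pos _ hpos]
              rw [pvGet_set_ne h pos i _ (fun e => hipos e.symm), hipp]
              exact hc h0 c hcedge hclen
            · rw [pvGet_set_ne h pos i _ (fun e => hipos e.symm)]
              rw [pvGet_set_ne h pos j _ (fun e => hjpos e.symm)]
              exact ha i j hedge hjlen hipos hjpos)
        (by -- C' : pos is the parent of c
          intro hc0 j hedge hj
          have hjlen : j < h.length := by omega
          have hpc : (c - 1) / 2 = pos := by omega
          rw [hpc, pvGet_set_self h pos _ hpos]
          rw [pvGet_set_ne h pos j _ (by omega)]
          exact ha c j hedge hjlen (by omega) (by omega))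
      refine ⟨hH, hP.trans ?_⟩
      exact perm_set_swap h pos c x hpos hclen (by omega)
    · rw [siftup_stop h pos x hch]
      have hlen' : (h.set pos x).length = h.length := by simp
      obtain ⟨hH, hP⟩ := siftdown_ok pos (h.set pos x) x (by omega)
        (by
          intro i j hedge hj hip hjp
          rw [pvGet_set_ne h pos i _ (fun e => hip e.symm)]
          rw [pvGet_set_ne h pos j _ (fun e => hjp e.symm)]
          exact ha i j hedge (by omega) hip hjp)
        (by intro j hedge hj; omega)
        (by intro h0 j hedge hj; omega)
      refine ⟨hH, hP.trans ?_⟩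
      rw [List.set_set]

lemma push_ok (h : List Int) (x : Int) (hh : IsHeap h) :
    IsHeap (heappush h x) ∧ List.Perm (heappush h x) (x :: h) := by
  have hlen : (h ++ [x]).length = h.length + 1 := by simp
  obtain ⟨hH, hP⟩ := siftdown_ok h.length (h ++ [x]) x (by omega)
    (by
      intro i j hedge hj hip hjp
      have hjlen : j < h.length := by omega
      have hilen : i < h.length := by omega
      rw [pvGet_append_lt h [x] i hilen, pvGet_append_lt h [x] j hjlen]
      exact hh i j hedge hjlen)
    (by intro j hedge hj; omega)
    (by intro h0 j hedge hj; omega)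
  have hset : ∀ (t : List Int), (t ++ [x]).set t.length x = t ++ [x] := by
    intro t
    induction t with
    | nil => rfl
    | cons y u iht => simp only [List.cons_append, List.length_cons, List.set_cons_succ, iht]
  refine ⟨hH, hP.trans ?_⟩
  rw [hset h]
  exact List.perm_append_singleton x h

lemma pop_ok (h : List Int) (hne : h ≠ []) (hh : IsHeap h) :
    (heappop h).1 = pvGet h 0 ∧ IsHeap (heappop h).2 ∧ List.Perm ((heappop h).1 :: (heappop h).2) h := by
  have hlenpos : 0 < h.length := List.length_pos_iff.mpr hne
  have hdrop : h.dropLast.length = h.length - 1 := List.length_dropLast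
  have hlastget : pvGet h (h.length - 1) = h.getLast hne := by
    rw [List.getLast_eq_getElem]
    simp [pvGet, List.getD, List.getElem?_eq_getElem (show h.length - 1 < h.length by omega)]
  have hsplit : h.dropLast ++ [pvGet h (h.length - 1)] = h := by
    rw [hlastget]; exact List.dropLast_append_getLast hne
  by_cases hrest : h.dropLast ≠ []
  · have hrlen : 0 < h.dropLast.length := List.length_pos_iff.mpr hrest
    have hget0 : pvGet h.dropLast 0 = pvGet h 0 := by
      simp only [pvGet, List.getD, List.getElem?_dropLast]
      rw [if_pos (by omega)]
    have hstep : heappop h =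
        (pvGet h.dropLast 0,
          siftup (h.dropLast.set 0 (pvGet h (h.length - 1))) 0 0 (pvGet h (h.length - 1))) := by
      simp only [heappop]
      rw [if_pos hrest]
    have hslen : (h.dropLast.set 0 (pvGet h (h.length - 1))).length = h.length - 1 := by
      simp [hdrop]
    obtain ⟨hH, hP⟩ := siftup_ok (h.length - 1) (h.dropLast.set 0 (pvGet h (h.length - 1))) 0
      (pvGet h (h.length - 1)) (by omega) (by omega)
      (by
        intro i j hedge hj hip hjp
        have hjlen : j < h.length - 1 := by omega
        have hilen : i < h.length - 1 := by omega
        rw [pvGet_set_ne _ 0 i _ (fun e => hip e.symm), pvGet_set_ne _ 0 j _ (fun e => hjp e.symm)]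
        have hgi : pvGet h.dropLast i = pvGet h i := by
          simp only [pvGet, List.getD, List.getElem?_dropLast]
          rw [if_pos (by omega)]
        have hgj : pvGet h.dropLast j = pvGet h j := by
          simp only [pvGet, List.getD, List.getElem?_dropLast]
          rw [if_pos (by omega)]
        rw [hgi, hgj]
        exact hh i j hedge (by omega))
      (by intro h0; omega)
    rw [hstep]
    refine ⟨hget0, hH, ?_⟩
    rw [List.set_set] at hP
    refine (List.Perm.cons _ hP).trans ?_
    rw [hget0]
    have h1 := set_cons_perm h.dropLast 0 (pvGet h (h.length - 1)) hrlen
    rw [hget0] at h1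
    refine h1.trans ?_
    exact ((List.perm_append_singleton _ _).symm.trans (by rw [hsplit])).symm.symm
  · have h1 : h.length = 1 := by
      have := List.length_pos_iff.mpr hne
      have h0 : h.dropLast = [] := not_not.mp hrest
      rw [h0] at hdrop
      simp at hdrop
      omega
    obtain ⟨a, rfl⟩ := List.length_eq_one_iff.mp h1
    simp [heappop, pvGet, IsHeap]

-- insort lemmas
lemma insort_perm (l : List Int) (x : Int) : List.Perm (insortR l x) (x :: l) := by
  induction l with
  | nil => simp [insortR]
  | cons y t ih =>
    by_cases hxy : x < y
    · simp [insortR, hxy]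
    · simp only [insortR, if_neg hxy]
      exact (List.Perm.cons y ih).trans (List.Perm.swap x y t)

lemma insort_sorted (l : List Int) (x : Int) (hl : l.Pairwise (· ≤ ·)) :
    (insortR l x).Pairwise (· ≤ ·) := by
  induction l with
  | nil => simp [insortR]
  | cons y t ih =>
    rcases List.pairwise_cons.mp hl with ⟨hy, ht⟩
    by_cases hxy : x < y
    · simp only [insortR, if_pos hxy]
      refine List.pairwise_cons.mpr ⟨?_, hl⟩
      intro b hb
      rcases List.mem_cons.mp hb with rfl | hb
      · exact le_of_lt hxy
      · exact le_trans (le_of_lt hxy) (hy b hb)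
    · simp only [insortR, if_neg hxy]
      refine List.pairwise_cons.mpr ⟨?_, ih ht⟩
      intro b hb
      rcases List.mem_cons.mp ((insort_perm t x).mem_iff.mp hb) with rfl | hb
      · exact le_of_not_gt hxy
      · exact hy b hb

-- sorted lookup of the maximum of the lower block
lemma sorted_last_eq (l : List Int) (m : Int) (hs : l.Pairwise (· ≤ ·)) (hm : m ∈ l)
    (hmax : ∀ a ∈ l, a ≤ m) : pvGet l (l.length - 1) = m := by
  have hne : l ≠ [] := by rintro rfl; simp at hm
  have hlen : 0 < l.length := List.length_pos_iff.mpr hne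
  have hidx : l.length - 1 < l.length := by omega
  obtain ⟨k, hk, rfl⟩ := List.mem_iff_getElem.mp hm
  have hget : pvGet l (l.length - 1) = l[l.length - 1] := by
    simp [pvGet, List.getD, List.getElem?_eq_getElem hidx]
  rw [hget]
  rcases Nat.lt_or_ge k (l.length - 1) with hklt | hkge
  · have := (List.pairwise_iff_getElem.mp hs) k (l.length - 1) hk hidx hklt
    exact le_antisymm (hmax _ (List.getElem_mem hidx)) this
  · have : k = l.length - 1 := by omega
    subst this; rfl

lemma sorted_lookup_max (ordered L U : List Int) (m : Int)
    (hs : ordered.Pairwise (· ≤ ·)) (hp : List.Perm (L ++ U) ordered)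
    (hcross : ∀ a ∈ L, ∀ b ∈ U, a ≤ b) (hm : m ∈ L) (hmax : ∀ a ∈ L, a ≤ m) :
    pvGet ordered (L.length - 1) = m := by
  have hLs := List.pairwise_mergeSort' (r := fun a b : Int => a ≤ b) L
  have hUs := List.pairwise_mergeSort' (r := fun a b : Int => a ≤ b) U
  have hLp := List.mergeSort_perm L (fun a b : Int => a ≤ b)
  have hUp := List.mergeSort_perm U (fun a b : Int => a ≤ b)
  have hSs : List.Pairwise (fun a b : Int => a ≤ b)
      (List.mergeSort L (fun a b : Int => a ≤ b) ++ List.mergeSort U (fun a b : Int => a ≤ b)) := by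
    refine List.pairwise_append.mpr ⟨hLs, hUs, ?_⟩
    intro a ha b hb
    exact hcross a (hLp.mem_iff.mp ha) b (hUp.mem_iff.mp hb)
  have hSp : List.Perm
      (List.mergeSort L (fun a b : Int => a ≤ b) ++ List.mergeSort U (fun a b : Int => a ≤ b))
      ordered := (hLp.append hUp).trans hp
  have hEq := hSp.eq_of_pairwise' hSs hs
  have hLlen : (List.mergeSort L (fun a b : Int => a ≤ b)).length = L.length := hLp.length_eq
  have hLne : L ≠ [] := by rintro rfl; simp at hm
  have hidx : L.length - 1 < (List.mergeSort L (fun a b : Int => a ≤ b)).length := by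
    rw [hLlen]; have := List.length_pos_iff.mpr hLne; omega
  calc pvGet ordered (L.length - 1)
      = pvGet (List.mergeSort L (fun a b : Int => a ≤ b) ++
          List.mergeSort U (fun a b : Int => a ≤ b)) (L.length - 1) := by rw [hEq]
    _ = pvGet (List.mergeSort L (fun a b : Int => a ≤ b)) (L.length - 1) :=
        pvGet_append_lt _ _ _ hidx
    _ = m := by
        have := sorted_last_eq (List.mergeSort L (fun a b : Int => a ≤ b)) m hLs
          (hLp.mem_iff.mpr hm) (fun a ha => hmax a (hLp.mem_iff.mp ha))
        rw [hLp.length_eq] at this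
        exact this

-- the joint invariant of A's heaps and B's sorted list after n processed values
def MedInv (n : Nat) (minh maxh ordered : List Int) : Prop :=
  IsHeap minh ∧ IsHeap maxh ∧
  minh.length = n / 2 ∧ maxh.length = n - n / 2 ∧
  ordered.Pairwise (· ≤ ·) ∧
  List.Perm ((maxh.map (fun a => -a)) ++ minh) ordered ∧
  (∀ a ∈ maxh, ∀ b ∈ minh, -a ≤ b)

lemma step_ok (n : Nat) (minh maxh ordered : List Int) (v : Int) (hInv : MedInv n minh maxh ordered) :
    MedInv (n + 1) (aStep minh maxh v).1 (aStep minh maxh v).2 (insortR ordered v) := by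
  obtain ⟨hmnH, hmxH, hmnL, hmxL, hsort, hperm, hcross⟩ := hInv
  have hsort' : (insortR ordered v).Pairwise (· ≤ ·) := insort_sorted ordered v hsort
  have hordv : List.Perm (insortR ordered v) (v :: ordered) := insort_perm ordered v
  by_cases hlen : minh.length = maxh.length
  · -- n is even: v is pushed onto max_heap
    have hneven : n % 2 = 0 := by omega
    obtain ⟨hpushH, hpushP⟩ := push_ok maxh (-v) hmxH
    have hmxlen' : (heappush maxh (-v)).length = maxh.length + 1 := by
      simpa using hpushP.length_eq
    have hmxne : heappush maxh (-v) ≠ [] := by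
      apply List.ne_nil_of_length_pos; omega
    have hbeq : (minh.length == maxh.length) = true := by simp [hlen]
    have hstA : aStep minh maxh v =
        (if minh ≠ [] ∧ pvGet minh 0 < -(pvGet (heappush maxh (-v)) 0) then
          (heappush (heappop minh).2 (-(heappop (heappush maxh (-v))).1),
           heappush (heappop (heappush maxh (-v))).2 (-(heappop minh).1))
        else (minh, heappush maxh (-v))) := by
      simp [aStep, hbeq]
    by_cases g : minh ≠ [] ∧ pvGet minh 0 < -(pvGet (heappush maxh (-v)) 0)
    · -- rebalance fires
      have hmne := g.1
      have hmnpos : 0 < minh.length := List.length_pos_iff.mpr hmne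
      obtain ⟨hr1, hmh2H, hmh2P⟩ := pop_ok minh hmne hmnH
      obtain ⟨hr2, hxh2H, hxh2P⟩ := pop_ok (heappush maxh (-v)) hmxne hpushH
      -- the popped max-heap root is the value -v just pushed
      have hr2v : (heappop (heappush maxh (-v))).1 = -v := by
        have hr2mem : (heappop (heappush maxh (-v))).1 ∈ heappush maxh (-v) := by
          rw [hr2]; exact pvGet_mem _ 0 (by omega)
        rcases List.mem_cons.mp (hpushP.mem_iff.mp hr2mem) with hEq | hmem
        · exact hEq
        · exfalso
          have h1 := hcross _ hmem (pvGet minh 0) (pvGet_mem minh 0 hmnpos)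
          have h2 := g.2
          rw [hr2] at h1
          omega
      have hnegr2 : -(heappop (heappush maxh (-v))).1 = v := by rw [hr2v, neg_neg]
      rw [hstA, if_pos g]
      dsimp only
      rw [hnegr2]
      obtain ⟨hp1H, hp1P⟩ := push_ok (heappop minh).2 v hmh2H
      obtain ⟨hp2H, hp2P⟩ := push_ok (heappop (heappush maxh (-v))).2 (-(heappop minh).1) hxh2H
      have hxh2perm : List.Perm (heappop (heappush maxh (-v))).2 maxh := by
        have h1 : List.Perm ((heappop (heappush maxh (-v))).1 :: (heappop (heappush maxh (-v))).2)
            ((-v) :: maxh) := hxh2P.trans hpushP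
        rw [hr2v] at h1
        exact h1.cons_inv
      have hmh2sub : ∀ b ∈ (heappop minh).2, b ∈ minh := fun b hb =>
        hmh2P.mem_iff.mp (List.mem_cons_of_mem _ hb)
      have hmh2len : (heappop minh).2.length + 1 = minh.length := by
        simpa using hmh2P.length_eq
      have hxh2len : (heappop (heappush maxh (-v))).2.length = maxh.length := hxh2perm.length_eq
      have hg2 : pvGet minh 0 < v := by
        have h2 := g.2
        have hroot : pvGet (heappush maxh (-v)) 0 ≤ -v :=
          heap_root_min _ hpushH (-v) (hpushP.mem_iff.mpr List.mem_cons_self)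
        omega
      refine ⟨hp1H, hp2H, ?_, ?_, hsort', ?_, ?_⟩
      · have := hp1P.length_eq; simp at this; omega
      · have := hp2P.length_eq; simp at this; omega
      · -- multiset invariant
        have hmapP : List.Perm
            ((heappush (heappop (heappush maxh (-v))).2 (-(heappop minh).1)).map (fun a => -a))
            ((heappop minh).1 :: (heappop (heappush maxh (-v))).2.map (fun a => -a)) := by
          simpa using hp2P.map (fun a : Int => -a)
        have hmapmax : List.Perm ((heappop (heappush maxh (-v))).2.map (fun a => -a))
            (maxh.map (fun a => -a)) := hxh2perm.map _
        have c1 := hmapP.append hp1P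
        have c2 : List.Perm
            (((heappop minh).1 :: (heappop (heappush maxh (-v))).2.map (fun a => -a)) ++
              (v :: (heappop minh).2))
            (v :: ((heappop minh).1 :: ((heappop (heappush maxh (-v))).2.map (fun a => -a) ++
              (heappop minh).2))) :=
          (List.Perm.cons (heappop minh).1 List.perm_middle).trans (List.Perm.swap v _ _)
        have c3 : List.Perm ((heappop minh).1 :: ((heappop (heappush maxh (-v))).2.map (fun a => -a) ++
            (heappop minh).2)) ordered :=
          ((List.Perm.cons (heappop minh).1 (hmapmax.append (List.Perm.refl _))).trans
            (List.perm_middle.symm.trans ((List.Perm.refl (maxh.map (fun a => -a))).append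
              hmh2P))).trans hperm
        exact ((c1.trans c2).trans (List.Perm.cons v c3)).trans hordv.symm
      · -- cross property
        intro a ha b hb
        have ha' := hp2P.mem_iff.mp ha
        have hb' := hp1P.mem_iff.mp hb
        rcases List.mem_cons.mp ha' with ha1 | hamem
        · rw [ha1, hr1, neg_neg]
          rcases List.mem_cons.mp hb' with hb1 | hbmem
          · rw [hb1]; exact le_of_lt hg2
          · exact heap_root_min minh hmnH b (hmh2sub b hbmem)
        · have hamax : a ∈ maxh := hxh2perm.mem_iff.mp hamem
          rcases List.mem_cons.mp hb' with hb1 | hbmem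
          · rw [hb1]
            have := hcross a hamax (pvGet minh 0) (pvGet_mem minh 0 hmnpos)
            omega
          · exact hcross a hamax b (hmh2sub b hbmem)
    · -- no rebalance
      rw [hstA, if_neg g]
      refine ⟨hmnH, hpushH, by dsimp only; omega, by dsimp only; omega, hsort', ?_, ?_⟩
      · dsimp only
        have hmap : List.Perm ((heappush maxh (-v)).map (fun a => -a))
            (v :: maxh.map (fun a => -a)) := by
          simpa using hpushP.map (fun a : Int => -a)
        refine List.Perm.trans (hmap.append (List.Perm.refl minh)) ?_
        exact (List.Perm.cons v hperm).trans hordv.symm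
      · dsimp only
        intro a ha b hb
        have hmnne2 : minh ≠ [] := List.ne_nil_of_mem hb
        have hge : -(pvGet (heappush maxh (-v)) 0) ≤ pvGet minh 0 := by
          rcases not_and_or.mp g with h1 | h2
          · exact absurd hmnne2 h1
          · omega
        have hrootb : pvGet minh 0 ≤ b := heap_root_min minh hmnH b hb
        have hroota : pvGet (heappush maxh (-v)) 0 ≤ a := heap_root_min _ hpushH a ha
        omega
  · -- n is odd: v is pushed onto min_heap
    have hnodd : n % 2 = 1 := by omega
    obtain ⟨hpushH, hpushP⟩ := push_ok minh v hmnH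
    have hmnlen' : (heappush minh v).length = minh.length + 1 := by
      simpa using hpushP.length_eq
    have hmnne : heappush minh v ≠ [] := by
      apply List.ne_nil_of_length_pos; omega
    have hmxpos : 0 < maxh.length := by omega
    have hmxne : maxh ≠ [] := List.ne_nil_of_length_pos hmxpos
    have hbeq : (minh.length == maxh.length) = false := by simp [hlen]
    have hstA : aStep minh maxh v =
        (if heappush minh v ≠ [] ∧ pvGet (heappush minh v) 0 < -(pvGet maxh 0) then
          (heappush (heappop (heappush minh v)).2 (-(heappop maxh).1),
           heappush (heappop maxh).2 (-(heappop (heappush minh v)).1))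
        else (heappush minh v, maxh)) := by
      simp [aStep, hbeq]
    by_cases g : heappush minh v ≠ [] ∧ pvGet (heappush minh v) 0 < -(pvGet maxh 0)
    · -- rebalance fires
      obtain ⟨hr1, hmh2H, hmh2P⟩ := pop_ok (heappush minh v) hmnne hpushH
      obtain ⟨hr2, hxh2H, hxh2P⟩ := pop_ok maxh hmxne hmxH
      -- the popped min-heap root is the value v just pushed
      have hr1v : (heappop (heappush minh v)).1 = v := by
        have hr1mem : (heappop (heappush minh v)).1 ∈ heappush minh v := by
          rw [hr1]; exact pvGet_mem _ 0 (by omega)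
        rcases List.mem_cons.mp (hpushP.mem_iff.mp hr1mem) with hEq | hmem
        · exact hEq
        · exfalso
          have h1 := hcross (pvGet maxh 0) (pvGet_mem maxh 0 hmxpos) _ hmem
          have h2 := g.2
          rw [hr1] at h1
          omega
      have hnegr1 : -(heappop (heappush minh v)).1 = -v := by rw [hr1v]
      rw [hstA, if_pos g]
      dsimp only
      rw [hnegr1]
      obtain ⟨hp1H, hp1P⟩ := push_ok (heappop (heappush minh v)).2 (-(heappop maxh).1) hmh2H
      obtain ⟨hp2H, hp2P⟩ := push_ok (heappop maxh).2 (-v) hxh2H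
      have hmh2perm : List.Perm (heappop (heappush minh v)).2 minh := by
        have h1 : List.Perm ((heappop (heappush minh v)).1 :: (heappop (heappush minh v)).2)
            (v :: minh) := hmh2P.trans hpushP
        rw [hr1v] at h1
        exact h1.cons_inv
      have hxh2sub : ∀ a ∈ (heappop maxh).2, a ∈ maxh := fun a ha =>
        hxh2P.mem_iff.mp (List.mem_cons_of_mem _ ha)
      have hxh2len : (heappop maxh).2.length + 1 = maxh.length := by
        simpa using hxh2P.length_eq
      have hmh2len : (heappop (heappush minh v)).2.length = minh.length := hmh2perm.length_eq
      have hg2 : v < -(pvGet maxh 0) := by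
        have h2 := g.2
        have hroot : pvGet (heappush minh v) 0 ≤ v :=
          heap_root_min _ hpushH v (hpushP.mem_iff.mpr List.mem_cons_self)
        omega
      refine ⟨hp1H, hp2H, ?_, ?_, hsort', ?_, ?_⟩
      · have := hp1P.length_eq; simp at this; omega
      · have := hp2P.length_eq; simp at this; omega
      · -- multiset invariant
        have hmapP : List.Perm ((heappush (heappop maxh).2 (-v)).map (fun a => -a))
            (v :: (heappop maxh).2.map (fun a => -a)) := by
          simpa using hp2P.map (fun a : Int => -a)
        have hmapmax : List.Perm (maxh.map (fun a => -a))
            (-(heappop maxh).1 :: (heappop maxh).2.map (fun a => -a)) := by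
          simpa using hxh2P.symm.map (fun a : Int => -a)
        have c1 := hmapP.append hp1P
        have c2 : List.Perm
            ((v :: (heappop maxh).2.map (fun a => -a)) ++
              (-(heappop maxh).1 :: (heappop (heappush minh v)).2))
            (v :: (-(heappop maxh).1 :: ((heappop maxh).2.map (fun a => -a) ++
              (heappop (heappush minh v)).2))) :=
          List.Perm.cons v List.perm_middle
        have c3 : List.Perm (-(heappop maxh).1 :: ((heappop maxh).2.map (fun a => -a) ++
            (heappop (heappush minh v)).2)) ordered :=
          ((List.Perm.cons _ ((List.Perm.refl _).append hmh2perm)).trans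
            (hmapmax.symm.append (List.Perm.refl minh))).trans hperm
        exact ((c1.trans c2).trans (List.Perm.cons v c3)).trans hordv.symm
      · -- cross property
        intro a ha b hb
        have ha' := hp2P.mem_iff.mp ha
        have hb' := hp1P.mem_iff.mp hb
        rcases List.mem_cons.mp ha' with ha1 | hamem
        · rw [ha1, neg_neg]
          rcases List.mem_cons.mp hb' with hb1 | hbmem
          · rw [hb1, hr2]; exact le_of_lt hg2
          · have hbmin : b ∈ minh := hmh2perm.mem_iff.mp hbmem
            have := hcross (pvGet maxh 0) (pvGet_mem maxh 0 hmxpos) b hbmin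
            omega
        · have hamax : a ∈ maxh := hxh2sub a hamem
          rcases List.mem_cons.mp hb' with hb1 | hbmem
          · rw [hb1, hr2]
            have := heap_root_min maxh hmxH a hamax
            omega
          · exact hcross a hamax b (hmh2perm.mem_iff.mp hbmem)
    · -- no rebalance
      rw [hstA, if_neg g]
      refine ⟨hpushH, hmxH, by dsimp only; omega, by dsimp only; omega, hsort', ?_, ?_⟩
      · dsimp only
        refine List.Perm.trans ((List.Perm.refl (maxh.map (fun a => -a))).append hpushP) ?_
        exact (List.perm_middle.trans (List.Perm.cons v hperm)).trans hordv.symm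
      · dsimp only
        intro a ha b hb
        rcases List.mem_cons.mp (hpushP.mem_iff.mp hb) with hb1 | hbmem
        · have hge : -(pvGet maxh 0) ≤ pvGet (heappush minh v) 0 := by
            rcases not_and_or.mp g with h1 | h2
            · exact absurd hmnne h1
            · omega
          have hrootb : pvGet (heappush minh v) 0 ≤ b := by
            rw [hb1]
            exact heap_root_min _ hpushH v (hpushP.mem_iff.mpr List.mem_cons_self)
          have hroota : pvGet maxh 0 ≤ a := heap_root_min maxh hmxH a ha
          omega
        · exact hcross a ha b hbmem

lemma inv_median (m : Nat) (minh maxh ordered : List Int) (hInv : MedInv m minh maxh ordered)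
    (hodd : m % 2 = 1) : -(pvGet maxh 0) = pvGet ordered ((m - 1) / 2) := by
  obtain ⟨hmnH, hmxH, hmnL, hmxL, hsort, hperm, hcross⟩ := hInv
  have hmxpos : 0 < maxh.length := by omega
  have hroot : pvGet maxh 0 ∈ maxh := pvGet_mem maxh 0 hmxpos
  have hidx : (maxh.map (fun a => -a)).length - 1 = (m - 1) / 2 := by
    simp only [List.length_map]; omega
  rw [← hidx]
  symm
  refine sorted_lookup_max ordered (maxh.map (fun a => -a)) minh (-(pvGet maxh 0))
    hsort hperm ?_ ?_ ?_
  · intro a ha b hb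
    obtain ⟨c, hc, rfl⟩ := List.mem_map.mp ha
    exact hcross c hc b hb
  · exact List.mem_map.mpr ⟨pvGet maxh 0, hroot, rfl⟩
  · intro a ha
    obtain ⟨c, hc, rfl⟩ := List.mem_map.mp ha
    exact neg_le_neg (heap_root_min maxh hmxH c hc)

lemma loops_eq : ∀ (vals : List Int) (n : Nat) (minh maxh ordered ans : List Int),
    MedInv n minh maxh ordered →
    aLoop vals minh maxh (n + 1) ans = bLoop vals ordered (n + 1) ans := by
  intro vals
  induction vals with
  | nil => intro n minh maxh ordered ans _; simp [aLoop, bLoop]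
  | cons v rest ih =>
    intro n minh maxh ordered ans hInv
    have hstep := step_ok n minh maxh ordered v hInv
    show aLoop rest (aStep minh maxh v).1 (aStep minh maxh v).2 (n + 1 + 1)
        (if (n + 1) % 2 == 1 then ans ++ [-(pvGet (aStep minh maxh v).2 0)] else ans) =
      bLoop rest (insortR ordered v) (n + 1 + 1)
        (if (n + 1) % 2 == 1 then ans ++ [pvGet (insortR ordered v) ((n + 1 - 1) / 2)] else ans)
    have hans : (if (n + 1) % 2 == 1 then ans ++ [-(pvGet (aStep minh maxh v).2 0)] else ans) =
        (if (n + 1) % 2 == 1 then ans ++ [pvGet (insortR ordered v) ((n + 1 - 1) / 2)] else ans) := by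
      by_cases hodd : (n + 1) % 2 = 1
      · rw [inv_median (n + 1) (aStep minh maxh v).1 (aStep minh maxh v).2
          (insortR ordered v) hstep hodd]
      · simp [hodd]
    rw [hans]
    exact ih (n + 1) _ _ _ _ hstep

-- ===== VERDICT (by name: the statement is the Claim_ definition above) =====
theorem solution_spec : Claim_equal_solution := by
  intro ts _
  unfold Spec_solution solution solution_alt
  exact loops_eq ts 0 [] [] [] [] (by
    refine ⟨?_, ?_, rfl, rfl, ?_, ?_, ?_⟩ <;> simp [IsHeap])
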